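-- pv_equiv track=rewrite | github.com/EloyTejero/Algo1-IP | Enunciado, Solución y tests-20250611/solucion_propia.py | maximas_cantidades_consecutivos
-- ===== SOURCE A (Python) =====
-- def maximas_cantidades_consecutivos(nums:list[int]) -> dict[int,int]:
--     maximas_cantidades:dict[int,int] = {}
--     ultimo:int
--     for num in nums:
--         if num in maximas_cantidades.keys():
--             if num == ultimo:
--                 cant += 1
--                 if cant > maximas_cantidades[num]:
--                     maximas_cantidades[num] = cant
--             else:
--                 ultimo = num
--                 cant = 1
--         else:
--             maximas_cantidades[num] = 1
--             ultimo = num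
--             cant = 1
--     return maximas_cantidades
-- ===== SOURCE B (Python) =====
-- def maximas_cantidades_consecutivos(nums: list[int]) -> dict[int, int]:
--     res: dict[int, int] = {}
--     i = 0
--     n = len(nums)
--     while i < n:
--         j = i + 1
--         while j < n and nums[j] == nums[i]:
--             j += 1
--         run = j - i
--         if run > res.get(nums[i], 0):
--             res[nums[i]] = run
--         i = j
--     return res
-- ===== Notes on version B (the rewrite author's own statement) =====
-- stated objective: alternative
-- what changed: Replaces A's per-element state machine (shared ultimo/cant variables threaded through three branches) with an outer loop over maximal runs: an inner scan finds the end of each run of equal values, then the dict entry is bumped once per run with max; the result dict is built per run, not per element.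
import Mathlib
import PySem

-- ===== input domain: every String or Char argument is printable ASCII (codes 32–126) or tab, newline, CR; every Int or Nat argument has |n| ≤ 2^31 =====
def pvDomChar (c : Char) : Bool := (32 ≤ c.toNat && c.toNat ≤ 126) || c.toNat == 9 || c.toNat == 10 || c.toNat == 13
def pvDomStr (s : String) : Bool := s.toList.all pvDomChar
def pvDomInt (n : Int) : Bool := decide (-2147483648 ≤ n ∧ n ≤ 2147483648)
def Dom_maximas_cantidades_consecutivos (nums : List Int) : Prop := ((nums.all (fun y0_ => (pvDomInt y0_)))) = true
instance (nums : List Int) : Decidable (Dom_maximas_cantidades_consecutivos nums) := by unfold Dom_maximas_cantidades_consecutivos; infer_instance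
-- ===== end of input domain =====

-- B replaces A's per-element ultimo/cant state machine with an outer loop over maximal
-- runs of equal consecutive values (objective: alternative decomposition, same cost).

-- ===== PORT A =====
-- state = (maximas_cantidades, ultimo, cant); ultimo/cant start as dummies: Python leaves
-- them unbound, and A never reads them before the else-branch (dict empty) assigns them.
def stepA (s : PySem.Dict Int Int × Int × Int) (num : Int) : PySem.Dict Int Int × Int × Int :=
  let (d, ultimo, cant) := s
  if d.contains num then
    if num = ultimo then
      let cant' := cant + 1
      -- maximas_cantidades[num]: key is present here, so getD 0 is exact
      if cant' > d.getD num 0 then (d.insert num cant', ultimo, cant')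
      else (d, ultimo, cant')
    else (d, num, 1)
  else (d.insert num 1, num, 1)

def maximas_cantidades_consecutivos (nums : List Int) : List (Int × Int) :=
  (nums.foldl stepA (PySem.Dict.empty, 0, 0)).1.items

-- ===== PORT B =====
-- the outer while of Source B: one iteration per maximal run; the inner while (count the run)
-- becomes takeWhile-length, advancing i to j becomes dropWhile.
def altGo (d : PySem.Dict Int Int) : List Int → PySem.Dict Int Int
  | [] => d
  | x :: rest =>
      let run : Int := 1 + ((rest.takeWhile (· == x)).length : Int)
      let d' := if run > d.getD x 0 then d.insert x run else d
      altGo d' (rest.dropWhile (· == x))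
termination_by l => l.length
decreasing_by
  have := List.length_dropWhile_le (p := (· == x)) (l := rest)
  simp only [List.length_cons]; omega

def maximas_cantidades_consecutivos_alt (nums : List Int) : List (Int × Int) :=
  (altGo PySem.Dict.empty nums).items

-- ===== PRECONDITION & SPEC =====
def Spec_maximas_cantidades_consecutivos (nums : List Int) (out : List (Int × Int)) : Prop := out = maximas_cantidades_consecutivos_alt nums
instance (nums : List Int) (out : List (Int × Int)) : Decidable (Spec_maximas_cantidades_consecutivos nums out) := by unfold Spec_maximas_cantidades_consecutivos; infer_instance

-- ===== CLAIM (what is proved, stated in full; the proofs are below) =====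
def Claim_equal_maximas_cantidades_consecutivos : Prop := ∀ (nums : List Int), Dom_maximas_cantidades_consecutivos nums → Spec_maximas_cantidades_consecutivos nums (maximas_cantidades_consecutivos nums)

-- ===== LEMMAS AND PROOFS =====

theorem altGo_nil (d : PySem.Dict Int Int) : altGo d [] = d := by
  simp [altGo]

theorem altGo_cons (d : PySem.Dict Int Int) (x : Int) (rest : List Int) :
    altGo d (x :: rest) =
      altGo (if 1 + ((rest.takeWhile (· == x)).length : Int) > d.getD x 0
             then d.insert x (1 + ((rest.takeWhile (· == x)).length : Int)) else d)
            (rest.dropWhile (· == x)) := by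
  rw [altGo]

-- Main invariant lemma: mid-run, A is in state (d, x, c) with d[x] = v, 1 ≤ c ≤ v and all
-- stored values ≥ 1; folding A over the rest equals B finishing the current run first.
theorem foldA_eq_altGo : ∀ (xs : List Int) (d : PySem.Dict Int Int) (x c v : Int),
    d.get? x = some v → 1 ≤ c → c ≤ v →
    (∀ k w, d.get? k = some w → 1 ≤ w) →
    (List.foldl stepA (d, x, c) xs).1 =
      altGo (if c + ((xs.takeWhile (· == x)).length : Int) > v
             then d.insert x (c + ((xs.takeWhile (· == x)).length : Int))
             else d)
            (xs.dropWhile (· == x)) := by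
  intro xs
  induction xs with
  | nil =>
    intro d x c v hv hc1 hcv hval
    simp only [List.takeWhile_nil, List.dropWhile_nil, List.length_nil, Nat.cast_zero,
      add_zero, List.foldl_nil]
    rw [if_neg (by omega), altGo_nil]
  | cons y ys ih =>
    intro d x c v hv hc1 hcv hval
    by_cases hyx : y = x
    · subst hyx
      have hcont : d.contains y = true := by
        rw [PySem.Dict.contains_eq_isSome_get?, hv]; rfl
      have hg : d.getD y 0 = v := PySem.Dict.getD_of_get?_eq_some d 0 hv
      simp only [List.foldl_cons, stepA, hcont, if_true, hg,
        List.takeWhile_cons, List.dropWhile_cons, BEq.rfl, List.length_cons]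
      have hcast : c + (((ys.takeWhile (· == y)).length + 1 : Nat) : Int)
          = (c + 1) + ((ys.takeWhile (· == y)).length : Int) := by push_cast; ring
      rw [hcast]
      by_cases h1 : c + 1 > v
      · rw [if_pos h1]
        have hval' : ∀ k w, (d.insert y (c + 1)).get? k = some w → 1 ≤ w := by
          intro k w hk
          rw [PySem.Dict.get?_insert] at hk
          by_cases hky : k = y
          · rw [if_pos hky] at hk; injection hk with h; omega
          · rw [if_neg hky] at hk; exact hval k w hk
        rw [ih (d.insert y (c + 1)) y (c + 1) (c + 1)
          (PySem.Dict.get?_insert_self _ _ _) (by omega) (by omega) hval']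
        congr 1
        split_ifs with ha hb
        · rw [PySem.Dict.insert_insert_self]
        · exfalso; omega
        · have h0 : ((ys.takeWhile (· == y)).length : Int) = 0 := by omega
          rw [h0]; norm_num
        · exfalso; omega
      · rw [if_neg h1]
        rw [ih d y (c + 1) v hv (by omega) (by omega) hval]
    · have hbx : (y == x) = false := by simp [hyx]
      simp only [List.foldl_cons, List.takeWhile_cons, List.dropWhile_cons, hbx,
        Bool.false_eq_true, if_false, List.length_nil, Nat.cast_zero, add_zero]
      rw [if_neg (by omega), altGo_cons]
      cases hgy : d.get? y with
      | some w =>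
        have hcont : d.contains y = true := by
          rw [PySem.Dict.contains_eq_isSome_get?, hgy]; rfl
        have hw1 : 1 ≤ w := hval y w hgy
        have hg : d.getD y 0 = w := PySem.Dict.getD_of_get?_eq_some d 0 hgy
        simp only [stepA, hcont, if_true, if_neg hyx, hg]
        rw [ih d y 1 w hgy (by omega) hw1 hval]
      | none =>
        have hcont : d.contains y = false := by
          rw [PySem.Dict.contains_eq_isSome_get?, hgy]; rfl
        have hg : d.getD y 0 = 0 := by
          rw [PySem.Dict.getD_eq_get?_getD, hgy]; rfl
        simp only [stepA, hcont, Bool.false_eq_true, if_false, hg]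
        have hval' : ∀ k w, (d.insert y 1).get? k = some w → 1 ≤ w := by
          intro k w hk
          rw [PySem.Dict.get?_insert] at hk
          by_cases hky : k = y
          · rw [if_pos hky] at hk; injection hk with h; omega
          · rw [if_neg hky] at hk; exact hval k w hk
        rw [ih (d.insert y 1) y 1 1 (PySem.Dict.get?_insert_self _ _ _)
          (by omega) (by omega) hval']
        congr 1
        split_ifs with ha hb
        · rw [PySem.Dict.insert_insert_self]
        · exfalso; omega
        · have h0 : ((ys.takeWhile (· == y)).length : Int) = 0 := by omega
          rw [h0]; norm_num
        · exfalso; omega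

-- ===== VERDICT (by name: the statement is the Claim_ definition above) =====
theorem maximas_cantidades_consecutivos_spec : Claim_equal_maximas_cantidades_consecutivos := by
  unfold Claim_equal_maximas_cantidades_consecutivos
  intro nums _
  unfold Spec_maximas_cantidades_consecutivos maximas_cantidades_consecutivos
    maximas_cantidades_consecutivos_alt
  cases nums with
  | nil => rw [altGo_nil]; rfl
  | cons x rest =>
    have hcont : (PySem.Dict.empty : PySem.Dict Int Int).contains x = false := rfl
    simp only [List.foldl_cons, stepA, hcont, Bool.false_eq_true, if_false]
    rw [altGo_cons]
    have hval' : ∀ k w, ((PySem.Dict.empty : PySem.Dict Int Int).insert x 1).get? k = some w → 1 ≤ w := by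
      intro k w hk
      rw [PySem.Dict.get?_insert] at hk
      by_cases hky : k = x
      · rw [if_pos hky] at hk; injection hk with h; omega
      · rw [if_neg hky] at hk
        rw [PySem.Dict.get?_empty] at hk
        exact absurd hk (by simp)
    rw [foldA_eq_altGo rest _ x 1 1 (PySem.Dict.get?_insert_self _ _ _)
      (by omega) (by omega) hval']
    have hg0 : (PySem.Dict.empty : PySem.Dict Int Int).getD x 0 = 0 := rfl
    rw [hg0]
    congr 2
    split_ifs with ha hb
    · rw [PySem.Dict.insert_insert_self]
    · exfalso; omega
    · have h0 : ((rest.takeWhile (· == x)).length : Int) = 0 := by omega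
      rw [h0]; norm_num
    · exfalso; omega
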